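-- pv_equiv track=rewrite | github.com/kdshop/pythonPodstawy2019 | zadanie14.py | getpotegi
-- ===== SOURCE A (Python) =====
-- def getpotegi(arrajka):
--     potegeven = 0
--     potegiodd = 0
--
--     for x in range(len(arrajka)):
--         if x % 2 == 0:
--             potegeven += arrajka[x]**x
--         else:
--             potegiodd += arrajka[x]**x
--
--     return [potegeven, potegiodd]
-- ===== SOURCE B (Python) =====
-- def getpotegi(arrajka):
--     # Partition up front with strided slices, then two staged passes whose
--     # exponent is reconstructed from the slice position.
--     evens = arrajka[0::2]
--     odds = arrajka[1::2]
--     potegeven = sum(v ** (2 * i) for i, v in enumerate(evens))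
--     potegiodd = sum(v ** (2 * i + 1) for i, v in enumerate(odds))
--     return [potegeven, potegiodd]
-- ===== Notes on version B (the rewrite author's own statement) =====
-- stated objective: alternative
-- what changed: Instead of one indexed loop branching on index parity, B partitions the list up front into two strided slices (arrajka[0::2], arrajka[1::2]) and sums each slice in its own pass, reconstructing the exponent 2*i / 2*i+1 from the slice position.
import Mathlib
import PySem

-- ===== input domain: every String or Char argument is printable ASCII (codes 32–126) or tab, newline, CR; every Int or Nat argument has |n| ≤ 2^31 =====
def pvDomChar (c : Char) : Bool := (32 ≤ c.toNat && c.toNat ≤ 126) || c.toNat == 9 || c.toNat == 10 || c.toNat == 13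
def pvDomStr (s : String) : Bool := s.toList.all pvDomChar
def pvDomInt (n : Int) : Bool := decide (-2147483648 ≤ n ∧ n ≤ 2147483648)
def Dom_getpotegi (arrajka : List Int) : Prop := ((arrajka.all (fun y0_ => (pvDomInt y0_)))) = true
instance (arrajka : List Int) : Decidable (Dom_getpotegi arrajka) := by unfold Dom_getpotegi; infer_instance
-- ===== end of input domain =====

-- B replaces A's single indexed loop with a parity branch by an up-front partition
-- into two strided slices and two staged summation passes (alternative decomposition, same cost).

-- ===== PORT A =====
def getpotegi (arrajka : List Int) : List Int :=
  let r := (PySem.List.pyRange 0 arrajka.length 1).foldl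
    (fun (s : Int × Int) (x : Int) =>
      if PySem.Int.mod x 2 = 0 then (s.1 + (PySem.List.pyGetD arrajka x 0) ^ x.toNat, s.2)
      else (s.1, s.2 + (PySem.List.pyGetD arrajka x 0) ^ x.toNat))
    (0, 0)
  [r.1, r.2]

-- ===== PORT B =====
def getpotegi_alt (arrajka : List Int) : List Int :=
  let evens := (PySem.List.slice? arrajka (some 0) none 2).getD []
  let odds := (PySem.List.slice? arrajka (some 1) none 2).getD []
  let potegeven := (PySem.List.enumerate evens 0).foldl
    (fun (s : Int) (p : Int × Int) => s + p.2 ^ (2 * p.1).toNat) 0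
  let potegiodd := (PySem.List.enumerate odds 0).foldl
    (fun (s : Int) (p : Int × Int) => s + p.2 ^ (2 * p.1 + 1).toNat) 0
  [potegeven, potegiodd]

-- ===== PRECONDITION & SPEC =====
def Spec_getpotegi (arrajka : List Int) (out : List Int) : Prop := out = getpotegi_alt arrajka
instance (arrajka : List Int) (out : List Int) : Decidable (Spec_getpotegi arrajka out) := by unfold Spec_getpotegi; infer_instance

-- ===== CLAIM =====
def Claim_equal_getpotegi : Prop := ∀ (arrajka : List Int), Dom_getpotegi arrajka → Spec_getpotegi arrajka (getpotegi arrajka)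

-- ===== LEMMAS AND PROOFS =====

-- every other element of a list, starting with the first
def everyOther : List Int → List Int
  | [] => []
  | [a] => [a]
  | a :: _ :: t => a :: everyOther t

-- common specification: pair sums of elements of t raised to k, k+1, k+2, …, for even k
def pvS : List Int → Nat → Int × Int
  | [], _ => (0, 0)
  | [a], k => (a ^ k, 0)
  | a :: b :: t, k => ((pvS t (k + 2)).1 + a ^ k, (pvS t (k + 2)).2 + b ^ (k + 1))

lemma everyOther_cons (b : Int) (t : List Int) :
    everyOther (b :: t) = b :: everyOther (t.drop 1) := by
  cases t <;> rfl

lemma pvMapRange (M : List Int) :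
    (List.range ((M.length + 1) / 2)).map (fun k => M.getD (2 * k) 0) = everyOther M := by
  induction M using everyOther.induct with
  | case1 => rfl
  | case2 a => simp [everyOther]
  | case3 a b t ih =>
    have hlen : ((a :: b :: t).length + 1) / 2 = (t.length + 1) / 2 + 1 := by
      simp; omega
    rw [hlen, List.range_succ_eq_map, List.map_cons, List.map_map, everyOther, ← ih]
    congr 1

-- the strided slice xs[s::2] is everyOther of the dropped list
lemma pvSlice2 (L : List Int) (s : Nat) :
    PySem.List.slice? L (some (s : Int)) none 2 = some (everyOther (L.drop s)) := by
  have hsn : ¬ ((s : Int) < 0) := Int.not_lt.mpr (Int.natCast_nonneg s)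
  by_cases hs : s ≤ L.length
  case neg =>
    have hd : L.drop s = [] := List.drop_eq_nil_of_le (by omega)
    have hmin : min (s : Int) (L.length : Int) = (L.length : Int) :=
      min_eq_right (by exact_mod_cast Nat.le_of_lt (by omega))
    simp only [PySem.List.slice?, PySem.List.sliceIndices, hd, everyOther]
    norm_num [hsn, hmin]
  case pos =>
    have hmin : min (s : Int) (L.length : Int) = (s : Int) :=
      min_eq_left (by exact_mod_cast hs)
    simp only [PySem.List.slice?, PySem.List.sliceIndices]
    norm_num [hsn, hmin]
    have hcnt : (if s < L.length
          then (((L.length : Int) - s + 2 - 1) / 2).toNat else 0)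
        = ((L.drop s).length + 1) / 2 := by
      rw [List.length_drop]
      by_cases h : s < L.length
      · rw [if_pos h]
        omega
      · rw [if_neg h]
        omega
    rw [hcnt]
    have h1 : ∀ k ∈ List.range (((L.drop s).length + 1) / 2),
        L[((s : Int) + 2 * (k : Int)).toNat]? = some (L.getD (s + 2 * k) 0) := by
      intro k hk
      rw [List.mem_range, List.length_drop] at hk
      have hlt : s + 2 * k < L.length := by omega
      have ht : ((s : Int) + 2 * (k : Int)).toNat = s + 2 * k := by omega
      rw [ht, List.getElem?_eq_getElem hlt, List.getD_eq_getElem _ _ hlt]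
    rw [List.filterMap_congr h1]
    rw [show (fun x => some (L.getD (s + 2 * x) 0)) = some ∘ (fun k => L.getD (s + 2 * k) 0) from rfl,
      List.filterMap_eq_map]
    have h2 : ∀ k ∈ List.range (((L.drop s).length + 1) / 2),
        L.getD (s + 2 * k) 0 = (L.drop s).getD (2 * k) 0 := by
      intro k _
      simp [List.getD_eq_getElem?_getD, List.getElem?_drop]
    rw [List.map_congr_left h2, pvMapRange]

-- B's even pass equals the first component of pvS
lemma pvFoldBE (t : List Int) (j : Nat) (c : Int) :
    (PySem.List.enumerate (everyOther t) (j : Int)).foldl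
      (fun (s : Int) (p : Int × Int) => s + p.2 ^ (2 * p.1).toNat) c
    = c + (pvS t (2 * j)).1 := by
  induction t using everyOther.induct generalizing j c with
  | case1 => simp [everyOther, pvS, PySem.List.enumerate_nil]
  | case2 a =>
    have he : (2 * (j : Int)).toNat = 2 * j := by omega
    simp [everyOther, pvS, PySem.List.enumerate_cons, PySem.List.enumerate_nil, he]
  | case3 a b t ih =>
    rw [everyOther, PySem.List.enumerate_cons, List.foldl_cons]
    have hj : (j : Int) + 1 = ((j + 1 : Nat) : Int) := by push_cast; ring
    rw [hj, ih (j + 1)]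
    have he : (2 * (j : Int)).toNat = 2 * j := by omega
    simp only [pvS, he]
    have : 2 * (j + 1) = 2 * j + 2 := by ring
    rw [this]
    ring

-- B's odd pass equals the second component of pvS
lemma pvFoldBO (t : List Int) (j : Nat) (c : Int) :
    (PySem.List.enumerate (everyOther (t.drop 1)) (j : Int)).foldl
      (fun (s : Int) (p : Int × Int) => s + p.2 ^ (2 * p.1 + 1).toNat) c
    = c + (pvS t (2 * j)).2 := by
  induction t using everyOther.induct generalizing j c with
  | case1 => simp [everyOther, pvS, PySem.List.enumerate_nil]
  | case2 a => simp [everyOther, pvS, PySem.List.enumerate_nil]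
  | case3 a b t ih =>
    have hd : (a :: b :: t).drop 1 = b :: t := rfl
    rw [hd, everyOther_cons, PySem.List.enumerate_cons, List.foldl_cons]
    have hj : (j : Int) + 1 = ((j + 1 : Nat) : Int) := by push_cast; ring
    rw [hj, ih (j + 1)]
    have he : (2 * (j : Int) + 1).toNat = 2 * j + 1 := by omega
    simp only [pvS, he]
    have : 2 * (j + 1) = 2 * j + 2 := by ring
    rw [this]
    ring

lemma pvGetD_drop (L t : List Int) (a : Int) (j : Nat) (h : L.drop j = a :: t) :
    PySem.List.pyGetD L (j : Int) 0 = a := by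
  rw [PySem.List.pyGetD_natCast]
  have h0 : L[j]? = some a := by
    have := congrArg (fun l : List Int => l[0]?) h
    simpa using this
  simp [List.getD, h0]

-- A's fold over range equals pvS
lemma pvFoldA_eq (L : List Int) (t : List Int) (j : Nat) (e o : Int)
    (hd : L.drop j = t) (hj : j % 2 = 0) :
    (List.map (fun k : Nat => (k : Int)) (List.range' j t.length)).foldl
      (fun (s : Int × Int) (x : Int) =>
        if PySem.Int.mod x 2 = 0 then (s.1 + (PySem.List.pyGetD L x 0) ^ x.toNat, s.2)
        else (s.1, s.2 + (PySem.List.pyGetD L x 0) ^ x.toNat))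
      (e, o) = (e + (pvS t j).1, o + (pvS t j).2) := by
  induction t, j using pvS.induct generalizing e o with
  | case1 j => simp [pvS]
  | case2 a j =>
    have ha := pvGetD_drop L [] a j hd
    have hm : PySem.Int.mod (j : Int) 2 = 0 := by
      simp [PySem.Int.mod, Int.fmod_eq_emod]; omega
    have hr : List.range' j ([a] : List Int).length = [j] := by simp
    rw [hr]
    simp only [List.map_cons, List.map_nil, List.foldl_cons, List.foldl_nil]
    rw [if_pos hm, ha]
    simp [pvS]
  | case3 a b t j ih =>
    have hd1 : L.drop (j + 1) = b :: t := by
      have : L.drop (j + 1) = (L.drop j).drop 1 := by rw [List.drop_drop]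
      rw [this, hd]; rfl
    have hd2 : L.drop (j + 2) = t := by
      have : L.drop (j + 2) = (L.drop j).drop 2 := by rw [List.drop_drop]
      rw [this, hd]; rfl
    have ha := pvGetD_drop L (b :: t) a j hd
    have hb : PySem.List.pyGetD L ((j : Int) + 1) 0 = b := by
      have := pvGetD_drop L t b (j + 1) hd1
      push_cast at this ⊢; exact this
    have hmj : PySem.Int.mod (j : Int) 2 = 0 := by
      simp [PySem.Int.mod, Int.fmod_eq_emod]; omega
    have hmj1 : ¬ PySem.Int.mod ((j : Int) + 1) 2 = 0 := by
      simp [PySem.Int.mod, Int.fmod_eq_emod]; omega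
    have hr : List.range' j (t.length + 1 + 1) =
        j :: (j + 1) :: List.range' (j + 2) t.length := by
      simp [List.range']
    rw [show (a :: b :: t).length = t.length + 1 + 1 by simp, hr]
    simp only [List.map_cons, List.foldl_cons]
    rw [if_pos hmj]
    push_cast
    rw [if_neg hmj1]
    rw [ha, hb]
    have hcast : ((j : Int) + 1).toNat = j + 1 := by omega
    simp only [hcast, Int.toNat_natCast]
    rw [ih _ _ hd2 (by omega)]
    simp only [pvS, Prod.mk.injEq]
    exact ⟨by ring, by ring⟩

-- ===== VERDICT =====
theorem getpotegi_spec : Claim_equal_getpotegi := by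
  intro L _
  show getpotegi L = getpotegi_alt L
  unfold getpotegi getpotegi_alt
  rw [PySem.List.pyRange_one]
  simp only [Int.sub_zero, Int.toNat_natCast, zero_add, List.range_eq_range']
  rw [pvFoldA_eq L L 0 0 0 rfl rfl]
  have e0 : PySem.List.slice? L (some 0) none 2 = some (everyOther L) := by
    simpa using pvSlice2 L 0
  have e1 : PySem.List.slice? L (some 1) none 2 = some (everyOther (L.drop 1)) := by
    simpa using pvSlice2 L 1
  rw [e0, e1]
  simp only [Option.getD_some, List.drop_one]
  have hbe := pvFoldBE L 0 0
  have hbo := pvFoldBO L 0 0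
  norm_num at hbe hbo
  rw [hbe, hbo]
  simp
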